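-- pv_equiv track=rewrite | github.com/Randoom97/AOC | 2021/Day23/Amphipod copy.py | canMoveTo
-- ===== SOURCE A (Python) =====
-- def canMoveTo(fromPos, toPos, occupied):
--     stepDir = (toPos[0]-fromPos[0])//abs(toPos[0]-fromPos[0])
--     xpos = fromPos[0]
--     ypos = fromPos[1]
--     if fromPos[1] == 0:
--         while xpos != toPos[0]:
--             xpos += stepDir
--             if (xpos, ypos) in occupied:
--                 return False
--         while ypos != toPos[1]:
--             ypos += 1
--             if (xpos, ypos) in occupied:
--                 return False
--         return True
--     else:
--         while ypos != toPos[1]: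
--             ypos -= 1
--             if (xpos, ypos) in occupied:
--                 return False
--         while xpos != toPos[0]:
--             xpos += stepDir
--             if (xpos, ypos) in occupied:
--                 return False
--         return True
-- ===== SOURCE B (Python) =====
-- def canMoveTo(fromPos, toPos, occupied):
--     fx, fy = fromPos
--     tx, ty = toPos
--     lo, hi = (fx, tx) if fx < tx else (tx, fx)
--     if fy == 0:
--         def on_path(c):
--             x, y = c
--             return (y == 0 and lo <= x <= hi and x != fx) or (x == tx and 1 <= y <= ty)
--     else:
--         def on_path(c):
--             x, y = c
--             return (x == fx and ty <= y < fy) or (y == ty and lo <= x <= hi and x != fx)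
--     return not any(map(on_path, occupied))
-- ===== Notes on version B (the rewrite author's own statement) =====
-- stated objective: alternative
-- what changed: B never walks the path: it derives a closed-form geometric predicate (interval/equality conditions) describing the L-shaped path cells and makes one pass over occupied testing each obstacle against it, instead of A's cell-by-cell walk with mutable x/y state, a division-derived step and a scan of occupied at every step.
-- outside the precondition, e.g. on canMoveTo((0, 1), (1, 2), {(0, 0)}): A returns False, B returns True; on canMoveTo((0, 0), (1, -1), {(1, 5)}): A returns False, B returns True
import Mathlib
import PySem

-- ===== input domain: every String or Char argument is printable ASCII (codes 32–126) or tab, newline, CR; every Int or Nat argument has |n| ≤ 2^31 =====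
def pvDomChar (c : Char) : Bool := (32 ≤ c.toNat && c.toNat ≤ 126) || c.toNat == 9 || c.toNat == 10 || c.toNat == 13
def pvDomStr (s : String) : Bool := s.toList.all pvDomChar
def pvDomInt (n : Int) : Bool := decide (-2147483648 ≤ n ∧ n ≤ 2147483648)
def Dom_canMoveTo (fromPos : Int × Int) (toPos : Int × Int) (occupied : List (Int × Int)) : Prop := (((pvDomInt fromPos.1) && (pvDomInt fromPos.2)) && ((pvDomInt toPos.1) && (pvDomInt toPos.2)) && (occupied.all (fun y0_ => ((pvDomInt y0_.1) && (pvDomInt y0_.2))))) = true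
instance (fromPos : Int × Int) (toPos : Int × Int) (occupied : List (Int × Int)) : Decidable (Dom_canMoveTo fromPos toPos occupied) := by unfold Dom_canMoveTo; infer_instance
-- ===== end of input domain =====

-- B replaces A's cell-by-cell walk (mutable x/y, division-derived step, scan of occupied at every
-- step) by a closed-form geometric predicate for the L-shaped path and ONE pass over occupied
-- (objective: alternative).  Equivalence is on the return value, on the inputs Pre_ admits.

-- ===== PORT A =====
-- One while-loop of A: move `n` steps of (dx,dy) from `pos`, failing (none) when a visited cell is
-- occupied.  Inside Pre_canMoveTo the fuel `n` given at each call site equals the exact number of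
-- iterations A's while loop performs (the loop condition is reached exactly at step n), so this is
-- an exact transcription of the loop there.
def walkA (occ : List (Int × Int)) (dx dy : Int) : Nat → Int × Int → Option (Int × Int)
  | 0, pos => some pos
  | n+1, pos =>
    let p := (pos.1 + dx, pos.2 + dy)
    if p ∈ occ then none else walkA occ dx dy n p

def canMoveTo (fromPos : Int × Int) (toPos : Int × Int) (occupied : List (Int × Int)) : Bool :=
  let d := toPos.1 - fromPos.1
  let stepDir := PySem.Int.floordiv d |d|   -- Python raises ZeroDivisionError when d = 0: excluded by Pre_
  if fromPos.2 == 0 then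
    match walkA occupied stepDir 0 d.natAbs (fromPos.1, fromPos.2) with
    | none => false
    | some p =>
      match walkA occupied 0 1 (toPos.2 - fromPos.2).toNat p with
      | none => false
      | some _ => true
  else
    match walkA occupied 0 (-1) (fromPos.2 - toPos.2).toNat (fromPos.1, fromPos.2) with
    | none => false
    | some p =>
      match walkA occupied stepDir 0 d.natAbs p with
      | none => false
      | some _ => true

-- ===== PORT B =====
-- Source B: a closed-form on_path predicate (interval/equality tests) chosen by the y==0 branch,
-- then `not any(map(on_path, occupied))` — one pass over occupied, no walking at all.
def canMoveTo_alt (fromPos : Int × Int) (toPos : Int × Int) (occupied : List (Int × Int)) : Bool :=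
  let fx := fromPos.1
  let fy := fromPos.2
  let tx := toPos.1
  let ty := toPos.2
  let lo := if fx < tx then fx else tx
  let hi := if fx < tx then tx else fx
  let onPath : Int × Int → Bool :=
    if fy == 0 then
      fun c => (decide (c.2 = 0) && decide (lo ≤ c.1) && decide (c.1 ≤ hi) && decide (c.1 ≠ fx))
        || (decide (c.1 = tx) && decide (1 ≤ c.2) && decide (c.2 ≤ ty))
    else
      fun c => (decide (c.1 = fx) && decide (ty ≤ c.2) && decide (c.2 < fy))
        || (decide (c.2 = ty) && decide (lo ≤ c.1) && decide (c.1 ≤ hi) && decide (c.1 ≠ fx))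
  !(occupied.any onPath)

-- ===== PRECONDITION & SPEC =====
-- Pre_ excludes equal columns (A's first line divides by zero there: ZeroDivisionError) and
-- wrong-direction targets (a hallway start with a negative target row, or a room start with a
-- target row above the start), on which A's unguarded while loops walk off the board forever —
-- diverging, or returning False only because an off-path obstacle happens to sit in the way.
def Pre_canMoveTo (fromPos : Int × Int) (toPos : Int × Int) (occupied : List (Int × Int)) : Prop :=
  fromPos.1 ≠ toPos.1 ∧ (if fromPos.2 = 0 then 0 ≤ toPos.2 else toPos.2 ≤ fromPos.2)
instance (fromPos : Int × Int) (toPos : Int × Int) (occupied : List (Int × Int)) : Decidable (Pre_canMoveTo fromPos toPos occupied) := by unfold Pre_canMoveTo; infer_instance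

def pvWitness_canMoveTo : (Int × Int) × (Int × Int) × (List (Int × Int)) := ((0, 0), (3, 2), [(1, 1)])

def Spec_canMoveTo (fromPos : Int × Int) (toPos : Int × Int) (occupied : List (Int × Int)) (out : Bool) : Prop := out = canMoveTo_alt fromPos toPos occupied
instance (fromPos : Int × Int) (toPos : Int × Int) (occupied : List (Int × Int)) (out : Bool) : Decidable (Spec_canMoveTo fromPos toPos occupied out) := by unfold Spec_canMoveTo; infer_instance

-- ===== CLAIM (what is proved, stated in full; the proofs are below) =====
def Claim_equal_canMoveTo : Prop := ∀ (fromPos : Int × Int) (toPos : Int × Int) (occupied : List (Int × Int)), Dom_canMoveTo fromPos toPos occupied → Pre_canMoveTo fromPos toPos occupied → Spec_canMoveTo fromPos toPos occupied (canMoveTo fromPos toPos occupied)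

-- ===== LEMMAS AND PROOFS =====

-- The list of cells A's loop visits: steps 1..n of (dx,dy) from pos.
def cellsOf (pos : Int × Int) (dx dy : Int) (n : Nat) : List (Int × Int) :=
  (List.range n).map (fun (i : Nat) => (pos.1 + ((i : Int)+1)*dx, pos.2 + ((i : Int)+1)*dy))

theorem cellsOf_succ (pos : Int × Int) (dx dy : Int) (n : Nat) :
    cellsOf pos dx dy (n+1) =
      (pos.1 + dx, pos.2 + dy) :: cellsOf (pos.1 + dx, pos.2 + dy) dx dy n := by
  unfold cellsOf
  rw [List.range_succ_eq_map, List.map_cons, List.map_map]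
  refine congrArg₂ _ (by simp) (List.map_congr_left ?_)
  intro i _
  simp only [Function.comp_apply]
  refine Prod.ext ?_ ?_ <;> · simp only []; push_cast; ring

-- A's loop fails iff one of the n visited cells is occupied, else ends n steps further along.
theorem walkA_char (occ : List (Int × Int)) (dx dy : Int) (n : Nat) (pos : Int × Int) :
    walkA occ dx dy n pos =
      if (cellsOf pos dx dy n).all (fun c => !decide (c ∈ occ))
      then some (pos.1 + (n : Int)*dx, pos.2 + (n : Int)*dy) else none := by
  induction n generalizing pos with
  | zero => simp [walkA, cellsOf]
  | succ n ih =>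
    rw [cellsOf_succ]
    show (if (pos.1 + dx, pos.2 + dy) ∈ occ then none
          else walkA occ dx dy n (pos.1 + dx, pos.2 + dy)) = _
    by_cases h : (pos.1 + dx, pos.2 + dy) ∈ occ
    · simp [h]
    · rw [if_neg h, ih]
      simp only [List.all_cons, h, decide_false, Bool.not_false, Bool.true_and]
      by_cases hall : (cellsOf (pos.1 + dx, pos.2 + dy) dx dy n).all (fun c => !decide (c ∈ occ))
      · rw [if_pos hall, if_pos hall]
        refine congrArg _ (Prod.ext ?_ ?_) <;> · simp only []; push_cast; ring
      · rw [if_neg hall, if_neg hall]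

theorem mem_cellsOf (c pos : Int × Int) (dx dy : Int) (n : Nat) :
    c ∈ cellsOf pos dx dy n ↔
      ∃ i : Nat, i < n ∧ c = (pos.1 + ((i : Int)+1)*dx, pos.2 + ((i : Int)+1)*dy) := by
  simp [cellsOf, eq_comm]

-- Geometric description of the horizontal run from fx (exclusive) to tx (inclusive) at row y0.
theorem mem_horiz (fx tx y0 x y : Int) :
    ((x, y) ∈ cellsOf (fx, y0) (if fx < tx then 1 else -1) 0 (tx - fx).natAbs) ↔
      (y = y0 ∧ (if fx < tx then fx else tx) ≤ x ∧ x ≤ (if fx < tx then tx else fx) ∧ x ≠ fx) := by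
  rw [mem_cellsOf]
  by_cases h : fx < tx
  · simp only [if_pos h, mul_one, mul_zero, add_zero, Prod.mk.injEq]
    constructor
    · rintro ⟨i, hi, hx, hy⟩; omega
    · rintro ⟨hy, h1, h2, h3⟩; exact ⟨(x - fx - 1).toNat, by omega, by omega, hy⟩
  · simp only [if_neg h, mul_neg_one, mul_zero, add_zero, Prod.mk.injEq]
    constructor
    · rintro ⟨i, hi, hx, hy⟩; omega
    · rintro ⟨hy, h1, h2, h3⟩; exact ⟨(fx - x - 1).toNat, by omega, by omega, hy⟩

-- Geometric description of the upward run (tx, 1..ty).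
theorem mem_vert_up (tx ty x y : Int) :
    ((x, y) ∈ cellsOf (tx, 0) 0 1 ty.toNat) ↔ (x = tx ∧ 1 ≤ y ∧ y ≤ ty) := by
  rw [mem_cellsOf]
  simp only [mul_zero, add_zero, mul_one, zero_add, Prod.mk.injEq]
  constructor
  · rintro ⟨i, hi, hx, hy⟩; omega
  · rintro ⟨hx, h1, h2⟩; exact ⟨(y - 1).toNat, by omega, hx, by omega⟩

-- Geometric description of the downward run (fx, fy-1 .. ty).
theorem mem_vert_down (fx fy ty x y : Int) :
    ((x, y) ∈ cellsOf (fx, fy) 0 (-1) (fy - ty).toNat) ↔ (x = fx ∧ ty ≤ y ∧ y < fy) := by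
  rw [mem_cellsOf]
  simp only [mul_zero, add_zero, mul_neg_one, Prod.mk.injEq]
  constructor
  · rintro ⟨i, hi, hx, hy⟩; omega
  · rintro ⟨hx, h1, h2⟩; exact ⟨(fy - y - 1).toNat, by omega, hx, by omega⟩

-- Disjointness can be tested from either side.
theorem all_notmem_eq (cells occ : List (Int × Int)) :
    (cells.all fun c => !decide (c ∈ occ)) = !(occ.any fun c => decide (c ∈ cells)) := by
  rw [Bool.eq_iff_iff]
  simp only [List.all_eq_true, Bool.not_eq_true', List.any_eq_false, decide_eq_false_iff_not,
    decide_eq_true_eq]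
  constructor
  · intro h c hc hm; exact h c hm hc
  · intro h c hc hm; exact h c hm hc

theorem canMoveTo_spec : Claim_equal_canMoveTo := by
  intro fromPos toPos occ _ hpre
  obtain ⟨fx, fy⟩ := fromPos
  obtain ⟨tx, ty⟩ := toPos
  obtain ⟨hne, hterm⟩ := hpre
  simp only [ne_eq] at hne
  dsimp only at hne hterm
  have hd : tx - fx ≠ 0 := by omega
  have habs : 0 < |tx - fx| := abs_pos.mpr hd
  have hs : PySem.Int.floordiv (tx - fx) |tx - fx| = if fx < tx then 1 else -1 := by
    rcases lt_or_gt_of_ne hd with h | h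
    · have h1 : ¬ fx < tx := by omega
      rw [PySem.Int.floordiv_eq_ediv_of_pos habs, abs_of_neg h, Int.ediv_neg,
        Int.ediv_self hd, if_neg h1]
    · have h1 : fx < tx := by omega
      rw [PySem.Int.floordiv_eq_ediv_of_pos habs, abs_of_pos h, Int.ediv_self hd, if_pos h1]
  unfold Spec_canMoveTo canMoveTo canMoveTo_alt
  simp only [hs]
  set s : Int := if fx < tx then 1 else -1 with hs_def
  by_cases hfy : fy = 0
  · -- hallway start
    subst hfy
    simp only [BEq.rfl, if_true]
    rw [walkA_char]
    have hfin : ((fx : Int) + ((tx - fx).natAbs : Int) * s, (0 : Int) + ((tx - fx).natAbs : Int) * 0)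
        = (tx, 0) := by
      rw [hs_def]; by_cases h : fx < tx
      · have hA : (((tx - fx).natAbs : Int)) = tx - fx :=
          Int.natAbs_of_nonneg (by omega)
        simp only [if_pos h, mul_one, mul_zero, add_zero, Prod.mk.injEq, hA]
        exact ⟨by omega, trivial⟩
      · have hA : (((tx - fx).natAbs : Int)) = -(tx - fx) := by
          rw [Int.natCast_natAbs, abs_of_nonpos (by omega : tx - fx ≤ 0)]
        simp only [if_neg h, mul_neg_one, mul_zero, add_zero, Prod.mk.injEq, hA]
        exact ⟨by omega, trivial⟩
    rw [hfin]
    have hB : (!(occ.any fun c =>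
          (decide (c.2 = 0) && decide ((if fx < tx then fx else tx) ≤ c.1) &&
            decide (c.1 ≤ (if fx < tx then tx else fx)) && decide (c.1 ≠ fx))
          || (decide (c.1 = tx) && decide (1 ≤ c.2) && decide (c.2 ≤ ty)))) =
        ((cellsOf (fx, 0) s 0 (tx - fx).natAbs).all (fun c => !decide (c ∈ occ)) &&
         (cellsOf (tx, 0) 0 1 ty.toNat).all (fun c => !decide (c ∈ occ))) := by
      rw [← List.all_append, all_notmem_eq]
      refine congrArg _ (congrArg _ (funext ?_))
      intro c
      obtain ⟨x, y⟩ := c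
      rw [Bool.eq_iff_iff]
      simp only [Bool.or_eq_true, Bool.and_eq_true, decide_eq_true_eq, List.mem_append,
        mem_horiz, mem_vert_up, hs_def]
      tauto
    rw [hB]
    by_cases hall1 : (cellsOf (fx, 0) s 0 (tx - fx).natAbs).all (fun c => !decide (c ∈ occ)) = true
    · rw [if_pos hall1, hall1, Bool.true_and]
      dsimp only
      rw [walkA_char]
      simp only [sub_zero]
      by_cases hall2 : (cellsOf (tx, 0) 0 1 ty.toNat).all (fun c => !decide (c ∈ occ)) = true
      · rw [if_pos hall2, hall2]
      · rw [if_neg hall2, Bool.eq_false_iff.mpr hall2]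
    · rw [if_neg hall1, Bool.eq_false_iff.mpr hall1, Bool.false_and]
  · -- room start
    have hty : ty ≤ fy := by simpa [hfy] using hterm
    have hbeq : (fy == 0) = false := by simpa using hfy
    simp only [hbeq, Bool.false_eq_true, if_false]
    rw [walkA_char]
    have hfin : ((fx : Int) + ((fy - ty).toNat : Int) * 0,
        (fy : Int) + ((fy - ty).toNat : Int) * (-1)) = (fx, ty) := by
      have hA : (((fy - ty).toNat : Int)) = fy - ty := Int.toNat_of_nonneg (by omega)
      simp only [mul_zero, add_zero, mul_neg_one, Prod.mk.injEq, hA]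
      exact ⟨trivial, by omega⟩
    rw [hfin]
    have hB : (!(occ.any fun c =>
          (decide (c.1 = fx) && decide (ty ≤ c.2) && decide (c.2 < fy))
          || (decide (c.2 = ty) && decide ((if fx < tx then fx else tx) ≤ c.1) &&
            decide (c.1 ≤ (if fx < tx then tx else fx)) && decide (c.1 ≠ fx)))) =
        ((cellsOf (fx, fy) 0 (-1) (fy - ty).toNat).all (fun c => !decide (c ∈ occ)) &&
         (cellsOf (fx, ty) s 0 (tx - fx).natAbs).all (fun c => !decide (c ∈ occ))) := by
      rw [← List.all_append, all_notmem_eq]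
      refine congrArg _ (congrArg _ (funext ?_))
      intro c
      obtain ⟨x, y⟩ := c
      rw [Bool.eq_iff_iff]
      simp only [Bool.or_eq_true, Bool.and_eq_true, decide_eq_true_eq, List.mem_append,
        mem_horiz, mem_vert_down, hs_def]
      tauto
    rw [hB]
    by_cases hall1 : (cellsOf (fx, fy) 0 (-1) (fy - ty).toNat).all (fun c => !decide (c ∈ occ)) = true
    · rw [if_pos hall1, hall1, Bool.true_and]
      dsimp only
      rw [walkA_char]
      dsimp only
      by_cases hall2 : (cellsOf (fx, ty) s 0 (tx - fx).natAbs).all (fun c => !decide (c ∈ occ)) = true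
      · rw [if_pos hall2, hall2]
      · rw [if_neg hall2, Bool.eq_false_iff.mpr hall2]
    · rw [if_neg hall1, Bool.eq_false_iff.mpr hall1, Bool.false_and]
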